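-- pv_equiv track=rewrite | github.com/just-record/python-practice | 03.number_baseball/02.number_baseball_with_functions/number_baseball_with_functions.py | analyze_guess
-- ===== SOURCE A (Python) =====
-- def analyze_guess(guess_numbers, random_numbers):
--     strike, ball = 0, 0
--     for i in range(3):
--         if guess_numbers[i] == random_numbers[i]:
--             strike += 1
--         elif guess_numbers[i] in random_numbers:
--             ball += 1
--     return strike, ball
-- ===== SOURCE B (Python) =====
-- def analyze_guess(guess_numbers, random_numbers):
--     pool = set(random_numbers)
--     def go(pairs):
--         if not pairs:
--             return 0, 0
--         g, r = pairs[0]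
--         s, b = go(pairs[1:])
--         if g == r:
--             return s + 1, b
--         if g in pool:
--             return s, b + 1
--         return s, b
--     return go([(guess_numbers[i], random_numbers[i]) for i in range(3)])
-- ===== Notes on version B (the rewrite author's own statement) =====
-- stated objective: alternative
-- what changed: Replaces A's single indexed loop with elif by building the list of the three (guess, random) index pairs and folding it by structural recursion back-to-front, with the ball membership tested against a set built once from random_numbers.
import Mathlib
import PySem

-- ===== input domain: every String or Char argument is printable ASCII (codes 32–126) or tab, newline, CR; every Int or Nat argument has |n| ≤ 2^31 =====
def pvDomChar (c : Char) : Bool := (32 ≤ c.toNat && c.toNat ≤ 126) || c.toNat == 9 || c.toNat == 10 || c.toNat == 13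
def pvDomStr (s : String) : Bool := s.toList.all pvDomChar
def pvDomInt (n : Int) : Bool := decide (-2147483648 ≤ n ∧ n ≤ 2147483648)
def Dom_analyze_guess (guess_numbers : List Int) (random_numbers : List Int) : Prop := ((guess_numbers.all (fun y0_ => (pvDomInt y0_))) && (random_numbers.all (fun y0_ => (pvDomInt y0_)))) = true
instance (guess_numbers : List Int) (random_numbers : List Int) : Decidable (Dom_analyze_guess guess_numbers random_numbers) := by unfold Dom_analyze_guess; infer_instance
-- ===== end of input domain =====

-- B replaces A's indexed range(3) loop with recursion over the list of indexed pairs (counted back-to-front) and a set pool for the ball test (alternative decomposition, same cost).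

-- ===== PORT A =====
-- for i in range(3): if g[i]==r[i]: strike+=1 elif g[i] in r: ball+=1
def analyze_guess (guess_numbers : List Int) (random_numbers : List Int) : Int × Int :=
  (PySem.List.pyRange 0 3 1).foldl
    (fun (sb : Int × Int) i =>
      (PySem.List.pyGet? guess_numbers i).elim sb (fun gi =>
        (PySem.List.pyGet? random_numbers i).elim sb (fun ri =>
          if gi = ri then (sb.1 + 1, sb.2)
          else if gi ∈ random_numbers then (sb.1, sb.2 + 1)
          else sb)))   -- the 'none' branches are unreachable under Pre_ (IndexError in Python)
    (0, 0)

-- ===== PORT B =====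
-- def go(pairs): recursion on the pair list, base (0,0), combining the head onto go(pairs[1:])
def pvGoB (pool : PySem.Set Int) : List (Int × Int) → Int × Int
  | [] => (0, 0)
  | (g, r) :: rest =>
    let sb := pvGoB pool rest
    if g = r then (sb.1 + 1, sb.2)
    else if PySem.Set.contains pool g then (sb.1, sb.2 + 1)
    else sb

-- pool = set(random_numbers); go([(g[i], r[i]) for i in range(3)])
def analyze_guess_alt (guess_numbers : List Int) (random_numbers : List Int) : Int × Int :=
  pvGoB (PySem.Set.ofList random_numbers)
    ((PySem.List.pyRange 0 3 1).map (fun i =>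
      ((PySem.List.pyGet? guess_numbers i).getD 0,
       (PySem.List.pyGet? random_numbers i).getD 0)))   -- getD 0 unreachable under Pre_ (IndexError in Python)

-- ===== PRECONDITION & SPEC =====
-- Pre_ excludes inputs where Python A raises IndexError: either list shorter than 3.
def Pre_analyze_guess (guess_numbers : List Int) (random_numbers : List Int) : Prop :=
  3 ≤ guess_numbers.length ∧ 3 ≤ random_numbers.length
instance (guess_numbers : List Int) (random_numbers : List Int) : Decidable (Pre_analyze_guess guess_numbers random_numbers) := by unfold Pre_analyze_guess; infer_instance

def pvWitness_analyze_guess : List Int × List Int := ([1, 2, 3], [3, 2, 1])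

def Spec_analyze_guess (guess_numbers : List Int) (random_numbers : List Int) (out : Int × Int) : Prop := out = analyze_guess_alt guess_numbers random_numbers
instance (guess_numbers : List Int) (random_numbers : List Int) (out : Int × Int) : Decidable (Spec_analyze_guess guess_numbers random_numbers out) := by unfold Spec_analyze_guess; infer_instance

-- ===== CLAIM (what is proved, stated in full; the proofs are below) =====
def Claim_equal_analyze_guess : Prop := ∀ (guess_numbers : List Int) (random_numbers : List Int), Dom_analyze_guess guess_numbers random_numbers → Pre_analyze_guess guess_numbers random_numbers → Spec_analyze_guess guess_numbers random_numbers (analyze_guess guess_numbers random_numbers)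

-- ===== LEMMAS AND PROOFS =====

-- ===== VERDICT (by name: the statement is the Claim_ definition above) =====
theorem analyze_guess_spec : Claim_equal_analyze_guess := by
  intro g r _ hpre
  obtain ⟨hg, hr⟩ := hpre
  match g, r with
  | g0 :: g1 :: g2 :: gs, r0 :: r1 :: r2 :: rs =>
    show _ = _
    have hrange : PySem.List.pyRange 0 3 1 = [0, 1, 2] := by decide
    simp only [analyze_guess, analyze_guess_alt, hrange, List.foldl, List.map, pvGoB]
    simp [PySem.List.pyGet?_of_nonneg, PySem.Set.mem_ofList]
    by_cases h0 : g0 = r0 <;> by_cases h1 : g1 = r1 <;> by_cases h2 : g2 = r2 <;>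
      by_cases m0 : g0 ∈ r0 :: r1 :: r2 :: rs <;>
      by_cases m1 : g1 ∈ r0 :: r1 :: r2 :: rs <;>
      by_cases m2 : g2 ∈ r0 :: r1 :: r2 :: rs <;>
      simp_all
  | [], _ => simp at hg
  | [_], _ => simp at hg
  | [_, _], _ => simp at hg
  | _ :: _ :: _ :: _, [] => simp at hr
  | _ :: _ :: _ :: _, [_] => simp at hr
  | _ :: _ :: _ :: _, [_, _] => simp at hr
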